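-- pv_equiv track=rewrite | github.com/David2261/Python_Algorithms | tinkoff/task_1.py | res_set
-- ===== SOURCE A (Python) =====
-- def res_set(interval_string):
-- 	intervals = interval_string.split(',')
-- 	result = set()
--
-- 	for interval in intervals:
-- 		if '-' not in interval:
-- 			result.add(int(interval))
-- 		else:
-- 			start, end = map(int, interval.split('-'))
-- 			result.update(range(start, end + 1))
--
-- 	return ' '.join(map(str, sorted(result)))
-- ===== SOURCE B (Python) =====
-- def res_set(interval_string):
--     # Parse tokens into (start, end) pairs, sort by start, merge overlapping or
--     # adjacent intervals in one sweep, then enumerate each merged interval.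
--     pairs = []
--     for tok in interval_string.split(','):
--         if '-' not in tok:
--             v = int(tok)
--             pairs.append((v, v))
--         else:
--             a, b = map(int, tok.split('-'))
--             pairs.append((a, b))
--     pairs.sort(key=lambda p: p[0])
--     merged = []
--     cur = None
--     for lo, hi in pairs:
--         if cur is None:
--             cur = (lo, hi)
--         elif lo <= cur[1] + 1:
--             cur = (cur[0], max(cur[1], hi))
--         else:
--             merged.append(cur)
--             cur = (lo, hi)
--     if cur is not None:
--         merged.append(cur)
--     out = []
--     for lo, hi in merged:
--         for x in range(lo, hi + 1):
--             out.append(str(x))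
--     return ' '.join(out)
-- ===== Notes on version B (the rewrite author's own statement) =====
-- stated objective: alternative
-- what changed: Instead of materializing every integer of every range into a set and sorting all of them, B parses tokens into (start,end) pairs, sorts the pairs by start, merges overlapping or adjacent intervals in one sweep, and enumerates only the merged disjoint intervals.
import Mathlib
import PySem

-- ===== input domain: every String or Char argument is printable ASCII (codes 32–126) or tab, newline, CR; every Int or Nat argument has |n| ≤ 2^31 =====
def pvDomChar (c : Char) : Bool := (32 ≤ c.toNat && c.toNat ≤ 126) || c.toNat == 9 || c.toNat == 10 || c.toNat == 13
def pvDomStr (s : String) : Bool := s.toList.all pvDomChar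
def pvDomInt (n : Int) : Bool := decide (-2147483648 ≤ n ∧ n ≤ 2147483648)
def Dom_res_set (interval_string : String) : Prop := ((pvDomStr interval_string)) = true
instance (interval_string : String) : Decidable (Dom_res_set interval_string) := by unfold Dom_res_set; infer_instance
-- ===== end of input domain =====

-- B replaces A's set of every single integer by a sort-and-merge sweep over (start,end)
-- interval pairs, enumerating only the merged disjoint intervals (objective: alternative).

-- ===== PORT A =====
-- one loop iteration of A: add the token's int, or update with the token's range
-- ('map(int, tok.split('-'))' unpacked to exactly two ints; the unreachable `_` arm
-- (Python raises there, outside Pre_) leaves the set unchanged)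
def stepA (result : PySem.Set Int) (interval : String) : PySem.Set Int :=
  if PySem.Str.isIn "-" interval = false then
    PySem.Set.add result ((PySem.Int.ofStr? interval).getD 0)
  else
    match ((PySem.Str.split? interval "-").getD []).map PySem.Int.ofStr? with
    | [some s, some e] => PySem.Set.update result (PySem.List.pyRange s (e + 1) 1)
    | _ => result

def res_set (interval_string : String) : String :=
  -- split? is some for the non-empty separator ","
  let intervals := (PySem.Str.split? interval_string ",").getD []
  let result := intervals.foldl stepA PySem.Set.empty
  PySem.Str.join " " ((PySem.List.sorted result (fun x => x) false).map PySem.Int.toStr)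

-- ===== PORT B =====
-- parse one token into its (start, end) pair (singleton n ↦ (n, n)); `_` unreachable inside Pre_
def stepParse (ps : List (Int × Int)) (tok : String) : List (Int × Int) :=
  if PySem.Str.isIn "-" tok = false then
    let v := (PySem.Int.ofStr? tok).getD 0
    ps ++ [(v, v)]
  else
    match ((PySem.Str.split? tok "-").getD []).map PySem.Int.ofStr? with
    | [some a, some b] => ps ++ [(a, b)]
    | _ => ps

-- one sweep step over the start-sorted pairs: state = (finished intervals, current interval)
def stepMerge (st : List (Int × Int) × Option (Int × Int)) (p : Int × Int) :
    List (Int × Int) × Option (Int × Int) :=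
  match st.2 with
  | none => (st.1, some p)
  | some c => if p.1 ≤ c.2 + 1 then (st.1, some (c.1, max c.2 p.2)) else (st.1 ++ [c], some p)

def res_set_alt (interval_string : String) : String :=
  let pairs := ((PySem.Str.split? interval_string ",").getD []).foldl stepParse []
  let pairs := PySem.List.sorted pairs (fun p => p.1) false
  let st := pairs.foldl stepMerge ([], none)
  let merged := match st.2 with | none => st.1 | some c => st.1 ++ [c]
  let out := merged.foldl
    (fun (out : List String) q => out ++ (PySem.List.pyRange q.1 (q.2 + 1) 1).map PySem.Int.toStr) []
  PySem.Str.join " " out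

-- ===== PRECONDITION & SPEC =====
-- Pre_: every comma token parses as Python's int() (no '-') or splits on '-' into exactly
-- two int() literals — exactly where A's int()/unpacking does not raise ValueError.
def Pre_res_set (interval_string : String) : Prop :=
  ∀ tok ∈ (PySem.Str.split? interval_string ",").getD [],
    if PySem.Str.isIn "-" tok = false then PySem.Int.ofStr? tok ≠ none
    else ((PySem.Str.split? tok "-").getD []).length = 2 ∧
      ∀ p ∈ (PySem.Str.split? tok "-").getD [], PySem.Int.ofStr? p ≠ none
instance (interval_string : String) : Decidable (Pre_res_set interval_string) := by
  unfold Pre_res_set; infer_instance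
def pvWitness_res_set : String := "4-6,1,9-9,5-3"
def Spec_res_set (interval_string : String) (out : String) : Prop := out = res_set_alt interval_string
instance (interval_string : String) (out : String) : Decidable (Spec_res_set interval_string out) := by
  unfold Spec_res_set; infer_instance

-- ===== CLAIM (what is proved, stated in full; the proofs are below) =====
def Claim_equal_res_set : Prop := ∀ (interval_string : String), Dom_res_set interval_string → Pre_res_set interval_string → Spec_res_set interval_string (res_set interval_string)

-- ===== LEMMAS AND PROOFS =====

-- the integers a parsed pair stands for
def itemsOf (q : Int × Int) : List Int := PySem.List.pyRange q.1 (q.2 + 1) 1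

-- the integers a token contributes (both ports contribute exactly these)
def tokItems (tok : String) : List Int :=
  if PySem.Str.isIn "-" tok = false then [(PySem.Int.ofStr? tok).getD 0]
  else
    match ((PySem.Str.split? tok "-").getD []).map PySem.Int.ofStr? with
    | [some a, some b] => PySem.List.pyRange a (b + 1) 1
    | _ => []

-- the pair(s) a token contributes in B
def pairsOf (tok : String) : List (Int × Int) :=
  if PySem.Str.isIn "-" tok = false then [((PySem.Int.ofStr? tok).getD 0, (PySem.Int.ofStr? tok).getD 0)]
  else
    match ((PySem.Str.split? tok "-").getD []).map PySem.Int.ofStr? with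
    | [some a, some b] => [(a, b)]
    | _ => []

-- recursive form of the merge sweep once a current interval exists
def mergeRun : (Int × Int) → List (Int × Int) → List (Int × Int)
  | c, [] => [c]
  | c, p :: ps => if p.1 ≤ c.2 + 1 then mergeRun (c.1, max c.2 p.2) ps else c :: mergeRun p ps

-- the finished interval list read off the sweep state
def mergedOf (st : List (Int × Int) × Option (Int × Int)) : List (Int × Int) :=
  match st.2 with | none => st.1 | some c => st.1 ++ [c]

theorem stepA_eq_update (s : PySem.Set Int) (t : String) :
    stepA s t = PySem.Set.update s (tokItems t) := by
  unfold stepA tokItems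
  split
  · rfl
  · split <;> rfl

theorem foldl_stepA (toks : List String) (s : PySem.Set Int) :
    toks.foldl stepA s = PySem.Set.update s (toks.flatMap tokItems) := by
  induction toks generalizing s with
  | nil => rfl
  | cons t ts ih =>
    simp only [List.foldl_cons, List.flatMap_cons, stepA_eq_update, ih,
      PySem.Set.update_append]

theorem stepParse_eq_append (ps : List (Int × Int)) (t : String) :
    stepParse ps t = ps ++ pairsOf t := by
  unfold stepParse pairsOf
  split
  · rfl
  · split <;> simp

theorem foldl_stepParse (toks : List String) (acc : List (Int × Int)) :
    toks.foldl stepParse acc = acc ++ toks.flatMap pairsOf := by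
  induction toks generalizing acc with
  | nil => simp
  | cons t ts ih => simp [stepParse_eq_append, ih, List.flatMap_cons]

theorem pairsOf_items (t : String) : (pairsOf t).flatMap itemsOf = tokItems t := by
  unfold pairsOf tokItems
  split
  · simp [itemsOf, PySem.List.pyRange_one_singleton]
  · split <;> simp [itemsOf]

theorem foldl_stepMerge (ps : List (Int × Int)) (acc : List (Int × Int)) (c : Int × Int) :
    mergedOf (ps.foldl stepMerge (acc, some c)) = acc ++ mergeRun c ps := by
  induction ps generalizing acc c with
  | nil => simp [mergedOf, mergeRun]
  | cons p ps ih =>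
    by_cases h : p.1 ≤ c.2 + 1
    · simp [stepMerge, h, ih, mergeRun]
    · simp [stepMerge, h, ih, mergeRun]

theorem mem_mergeRun_items (c : Int × Int) (ps : List (Int × Int)) (x : Int)
    (hlo : ∀ p ∈ ps, c.1 ≤ p.1) (hsort : ps.Pairwise (fun p q => p.1 ≤ q.1)) :
    x ∈ (mergeRun c ps).flatMap itemsOf ↔ x ∈ itemsOf c ∨ x ∈ ps.flatMap itemsOf := by
  induction ps generalizing c with
  | nil => simp [mergeRun]
  | cons p ps ih =>
    rcases List.pairwise_cons.mp hsort with ⟨hp, hps⟩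
    have hcp : c.1 ≤ p.1 := hlo p (List.mem_cons_self ..)
    by_cases h : p.1 ≤ c.2 + 1
    · rw [mergeRun, if_pos h,
        ih (c.1, max c.2 p.2) (fun q hq => hlo q (List.mem_cons_of_mem _ hq)) hps]
      simp only [itemsOf, PySem.List.mem_pyRange_one, List.flatMap_cons, List.mem_append]
      have hiff : (c.1 ≤ x ∧ x < max c.2 p.2 + 1) ↔
          ((c.1 ≤ x ∧ x < c.2 + 1) ∨ (p.1 ≤ x ∧ x < p.2 + 1)) := by omega
      tauto
    · rw [mergeRun, if_neg h]
      rw [List.flatMap_cons, List.flatMap_cons, List.mem_append, List.mem_append,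
        ih p hp hps]

theorem lb_mergeRun_items (c : Int × Int) (ps : List (Int × Int)) (x : Int)
    (hlo : ∀ p ∈ ps, c.1 ≤ p.1) (hsort : ps.Pairwise (fun p q => p.1 ≤ q.1))
    (hx : x ∈ (mergeRun c ps).flatMap itemsOf) : c.1 ≤ x := by
  rcases (mem_mergeRun_items c ps x hlo hsort).mp hx with h | h
  · simp only [itemsOf, PySem.List.mem_pyRange_one] at h; exact h.1
  · rcases List.mem_flatMap.mp h with ⟨p, hp, hxp⟩
    simp only [itemsOf, PySem.List.mem_pyRange_one] at hxp
    exact le_trans (hlo p hp) hxp.1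

theorem pairwise_mergeRun_items (c : Int × Int) (ps : List (Int × Int))
    (hlo : ∀ p ∈ ps, c.1 ≤ p.1) (hsort : ps.Pairwise (fun p q => p.1 ≤ q.1)) :
    ((mergeRun c ps).flatMap itemsOf).Pairwise (· < ·) := by
  induction ps generalizing c with
  | nil =>
    simpa [mergeRun, itemsOf] using PySem.List.pairwise_lt_pyRange_one c.1 (c.2 + 1)
  | cons p ps ih =>
    rcases List.pairwise_cons.mp hsort with ⟨hp, hps⟩
    have hcp : c.1 ≤ p.1 := hlo p (List.mem_cons_self ..)
    by_cases h : p.1 ≤ c.2 + 1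
    · rw [mergeRun, if_pos h]
      exact ih (c.1, max c.2 p.2) (fun q hq => hlo q (List.mem_cons_of_mem _ hq)) hps
    · rw [mergeRun, if_neg h]
      rw [List.flatMap_cons, List.pairwise_append]
      refine ⟨by simpa [itemsOf] using PySem.List.pairwise_lt_pyRange_one c.1 (c.2 + 1),
        ih p hp hps, ?_⟩
      intro x hx y hy
      have h1 : x ≤ c.2 := by
        simp only [itemsOf, PySem.List.mem_pyRange_one] at hx; omega
      have h2 : p.1 ≤ y := lb_mergeRun_items p ps y hp hps hy
      omega

-- ===== VERDICT (by name: the statement is the Claim_ definition above) =====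
theorem res_set_spec : Claim_equal_res_set := by
  intro s _ _
  unfold Spec_res_set res_set res_set_alt
  simp only []
  set toks := (PySem.Str.split? s ",").getD [] with htoks
  set S := toks.flatMap tokItems with hS
  -- A's set is the set of all contributed integers
  have hA : toks.foldl stepA PySem.Set.empty = PySem.Set.ofList S := by
    rw [foldl_stepA, PySem.Set.ofList_eq_foldl]; rfl
  rw [hA, foldl_stepParse]
  simp only [List.nil_append]
  set pairs := toks.flatMap pairsOf with hpairs
  have hSitems : ∀ x : Int, x ∈ pairs.flatMap itemsOf ↔ x ∈ S := by
    intro x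
    rw [hpairs, List.flatMap_assoc, List.flatMap_congr (fun t _ => pairsOf_items t)]
  rcases hP : PySem.List.sorted pairs (fun p => p.1) false with _ | ⟨p, ps⟩
  · -- no pairs at all: both sides are the empty join
    have hpe : pairs = [] := by
      have := PySem.List.sorted_perm pairs (fun p => p.1) false
      rw [hP] at this; exact (List.Perm.nil_eq this).symm
    have hSe : S = [] := by
      rcases hSl : S with _ | ⟨a, _⟩
      · rfl
      · exfalso
        have : a ∈ pairs.flatMap itemsOf := (hSitems a).mpr (by rw [hSl]; simp)
        rw [hpe] at this; simp at this
    rw [hSe]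
    rfl
  · -- at least one pair: the sweep runs with a current interval
    have hsorted : (p :: ps).Pairwise (fun a b : Int × Int => a.1 ≤ b.1) := by
      rw [← hP]; exact PySem.List.sorted_pairwise pairs (fun p => p.1)
    rcases List.pairwise_cons.mp hsorted with ⟨hp, hps⟩
    have hfold : List.foldl stepMerge ([], none) (p :: ps) =
        List.foldl stepMerge ([], some p) ps := by
      simp [stepMerge]
    rw [hfold]
    have hm : (match (ps.foldl stepMerge ([], some p)).2 with
        | none => (ps.foldl stepMerge ([], some p)).1
        | some c => (ps.foldl stepMerge ([], some p)).1 ++ [c]) = mergeRun p ps := by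
      simpa [mergedOf] using foldl_stepMerge ps [] p
    rw [hm]
    set L := (mergeRun p ps).flatMap itemsOf with hL
    have hLpair : L.Pairwise (· < ·) := pairwise_mergeRun_items p ps hp hps
    have hout : (mergeRun p ps).foldl
        (fun (out : List String) q => out ++ (PySem.List.pyRange q.1 (q.2 + 1) 1).map PySem.Int.toStr) []
        = L.map PySem.Int.toStr := by
      rw [PySem.List.foldl_append_eq_flatMap
        (fun q : Int × Int => (PySem.List.pyRange q.1 (q.2 + 1) 1).map PySem.Int.toStr)]
      rw [hL, List.map_flatMap]
      rfl
    rw [hout]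
    have hperm : L.Perm (PySem.Set.ofList S) := by
      rw [List.perm_ext_iff_of_nodup hLpair.nodup (PySem.Set.nodup_ofList S)]
      intro x
      rw [PySem.Set.mem_ofList, hL,
        mem_mergeRun_items p ps x hp hps, ← hSitems x]
      have hmem : x ∈ pairs.flatMap itemsOf ↔ x ∈ (p :: ps).flatMap itemsOf := by
        constructor
        · intro hx
          rcases List.mem_flatMap.mp hx with ⟨q, hq, hxq⟩
          exact List.mem_flatMap.mpr ⟨q, by
            rw [← hP]; exact (PySem.List.sorted_perm pairs (fun p => p.1) false).mem_iff.mpr hq, hxq⟩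
        · intro hx
          rcases List.mem_flatMap.mp hx with ⟨q, hq, hxq⟩
          exact List.mem_flatMap.mpr ⟨q, by
            rw [← hP] at hq
            exact (PySem.List.sorted_perm pairs (fun p => p.1) false).mem_iff.mp hq, hxq⟩
      rw [hmem, List.flatMap_cons, List.mem_append]
    rw [PySem.List.sorted_eq_of_perm_of_pairwise_lt (PySem.Set.ofList S) L (fun x => x) hperm
      (by simpa using hLpair)]
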